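-- pv_equiv track=rewrite | github.com/NESCAU-UFLA/FuzzingTool | src/modules/parsers/RequestParser.py | parseHeaderValue
-- ===== SOURCE A (Python) =====
-- def getIndexesToParse(paramContent: str):
--     """If the fuzzing tests will occur on the given value,
--        so get the list of positions of it to insert the payloads
--
--     @type paramContent: str
--     @param paramContent: The parameter content
--     @returns list: The positions indexes to insert the payload.
--                     Returns an empty list if the tests'll not occur
--     """
--     return [i for i, char in enumerate(paramContent) if char == '$']
--
-- def parseHeaderValue(value: str):
--     """Parse the header value into a list
--
--     @type value: str
--     @param value: The HTTP Header value
--     @returns list: The list with the HTTP Header value content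
--     """
--     headerValue = []
--     lastIndex = 0
--     for i in getIndexesToParse(value):
--         headerValue.append(value[lastIndex:i])
--         lastIndex = i+1
--     if lastIndex == len(value):
--         headerValue.append('')
--     else:
--         headerValue.append(value[lastIndex:len(value)])
--     return headerValue
-- ===== SOURCE B (Python) =====
-- def parseHeaderValue(value: str):
--     """Parse the header value into a list (single streaming pass)."""
--     headerValue = []
--     current = []
--     for char in value:
--         if char == '$':
--             headerValue.append(''.join(current))
--             current = []
--         else:
--             current.append(char)
--     headerValue.append(''.join(current))
--     return headerValue
-- ===== Notes on version B (the rewrite author's own statement) =====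
-- stated objective: simpler
-- what changed: Replaced the two-phase index-collection-then-slice approach (enumerate to find delimiter positions, then slice between them with a lastIndex cursor and a final length check) by one streaming pass that flushes a character buffer at each delimiter and once at the end.
import Mathlib
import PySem

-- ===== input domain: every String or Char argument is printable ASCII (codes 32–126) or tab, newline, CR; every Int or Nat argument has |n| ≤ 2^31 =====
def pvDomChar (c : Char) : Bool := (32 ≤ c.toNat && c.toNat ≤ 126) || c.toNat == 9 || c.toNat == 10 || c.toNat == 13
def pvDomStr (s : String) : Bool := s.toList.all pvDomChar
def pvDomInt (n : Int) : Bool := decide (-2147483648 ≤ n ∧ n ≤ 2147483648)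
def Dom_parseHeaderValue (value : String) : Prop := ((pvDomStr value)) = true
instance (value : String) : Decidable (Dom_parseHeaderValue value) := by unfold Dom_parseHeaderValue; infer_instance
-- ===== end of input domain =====

-- B replaces A's two-phase index-collection-then-slice approach by one streaming pass
-- over the characters (flush a buffer at each '$'); objective: simpler.

-- ===== PORT A =====
-- [i for i, char in enumerate(paramContent) if char == '$']
def getIndexesToParse (paramContent : String) : List Int :=
  (PySem.List.enumerate paramContent.toList).filterMap
    (fun p => if p.2 = '$' then some p.1 else none)

def parseHeaderValue (value : String) : List String :=
  let st := (getIndexesToParse value).foldl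
    (fun (st : List String × Int) i =>
      (st.1 ++ [PySem.Str.slice value (some st.2) (some i)], i + 1))
    ([], 0)
  if st.2 = PySem.Str.len value then
    st.1 ++ [""]
  else
    st.1 ++ [PySem.Str.slice value (some st.2) (some (PySem.Str.len value))]

-- ===== PORT B =====
-- streaming pass: state = (parts so far, current char buffer); ''.join(current) over
-- single chars is exactly String.ofList of the buffer.
def parseHeaderValue_alt (value : String) : List String :=
  let st := value.toList.foldl
    (fun (st : List String × List Char) c =>
      if c = '$' then (st.1 ++ [String.ofList st.2], [])
      else (st.1, st.2 ++ [c]))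
    ([], [])
  st.1 ++ [String.ofList st.2]

-- ===== PRECONDITION & SPEC =====
def Spec_parseHeaderValue (value : String) (out : List String) : Prop := out = parseHeaderValue_alt value
instance (value : String) (out : List String) : Decidable (Spec_parseHeaderValue value out) := by unfold Spec_parseHeaderValue; infer_instance

-- ===== CLAIM (what is proved, stated in full; the proofs are below) =====
def Claim_equal_parseHeaderValue : Prop := ∀ (value : String), Dom_parseHeaderValue value → Spec_parseHeaderValue value (parseHeaderValue value)

-- ===== LEMMAS AND PROOFS =====

-- Reference splitter: the pieces of cs between '$' characters (always nonempty).
def splitDollar : List Char → List (List Char)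
  | [] => [[]]
  | c :: cs =>
    if c = '$' then [] :: splitDollar cs
    else
      match splitDollar cs with
      | [] => [[c]]
      | h :: t => (c :: h) :: t

def mapHead (f : List Char → List Char) : List (List Char) → List (List Char)
  | [] => []
  | h :: t => f h :: t

theorem splitDollar_ne_nil (cs : List Char) : splitDollar cs ≠ [] := by
  cases cs with
  | nil => simp [splitDollar]
  | cons c cs =>
    simp only [splitDollar]
    split
    · simp
    · cases splitDollar cs <;> simp

theorem mapHead_id (l : List (List Char)) : mapHead (fun h => h) l = l := by
  cases l <;> simp [mapHead]

-- '$' positions of a char list, as a pure list function.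
def idxC : List Char → List Nat
  | [] => []
  | c :: cs => (if c = '$' then [0] else []) ++ (idxC cs).map (· + 1)

theorem filterMap_enumerate_eq (cs : List Char) (s : Nat) :
    (PySem.List.enumerate cs (s : Int)).filterMap
        (fun p => if p.2 = '$' then some p.1 else none)
      = (idxC cs).map (fun k => ((s + k : Nat) : Int)) := by
  induction cs generalizing s with
  | nil => simp [PySem.List.enumerate_nil, idxC]
  | cons c cs ih =>
    have h1 : ((s : Int) + 1) = ((s + 1 : Nat) : Int) := by push_cast; ring
    rw [PySem.List.enumerate_cons, List.filterMap_cons, h1, ih (s + 1)]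
    by_cases hc : c = '$'
    · have hidx : idxC (c :: cs) = 0 :: (idxC cs).map (· + 1) := by simp [idxC, hc]
      rw [hidx]
      simp only [hc, List.map_cons, List.map_map]
      refine congrArg₂ List.cons (by omega) ?_
      exact List.map_congr_left (fun k _ => by simp only [Function.comp_apply]; omega)
    · have hidx : idxC (c :: cs) = (idxC cs).map (· + 1) := by simp [idxC, hc]
      rw [hidx]
      simp only [hc, List.map_map]
      exact List.map_congr_left (fun k _ => by simp only [Function.comp_apply]; omega)

theorem getIndexesToParse_eq (value : String) :
    getIndexesToParse value = (idxC value.toList).map (fun k => ((0 + k : Nat) : Int)) := by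
  unfold getIndexesToParse
  exact filterMap_enumerate_eq value.toList 0

-- A's slice over natural bounds, as drop/take on the char list.
theorem slice_nat (value : String) (a b : Nat) :
    PySem.Str.slice value (some (a : Int)) (some (b : Int))
      = String.ofList ((value.toList.drop a).take (b - a)) := by
  apply String.toList_inj.mp
  simp [PySem.Str.toList_slice, PySem.Chars.slice_eq_listSlice, PySem.List.slice_natCast]

-- Abbreviations used only to state the loop lemmas readably.
def stepA (value : String) (st : List String × Int) (i : Int) : List String × Int :=
  (st.1 ++ [PySem.Str.slice value (some st.2) (some i)], i + 1)

-- A's loop + final append, generalized: lastIndex = L, chars full[L:M) are the pending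
-- (never-yet-sliced) buffer, and the remaining indexes are the '$' positions of the
-- suffix cs = value.toList.drop M, shifted by M.
theorem A_main (cs : List Char) (value : String) (L M : Nat) (acc : List String)
    (hdrop : value.toList.drop M = cs) (hLM : L ≤ M) (hM : M ≤ value.toList.length) :
    (if (((idxC cs).map (fun k => ((M + k : Nat) : Int))).foldl (stepA value) (acc, (L : Int))).2 = PySem.Str.len value
     then (((idxC cs).map (fun k => ((M + k : Nat) : Int))).foldl (stepA value) (acc, (L : Int))).1 ++ [""]
     else (((idxC cs).map (fun k => ((M + k : Nat) : Int))).foldl (stepA value) (acc, (L : Int))).1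
            ++ [PySem.Str.slice value (some (((idxC cs).map (fun k => ((M + k : Nat) : Int))).foldl (stepA value) (acc, (L : Int))).2) (some (PySem.Str.len value))])
    = acc ++ (mapHead (fun h => (value.toList.drop L).take (M - L) ++ h)
        (splitDollar cs)).map String.ofList := by
  induction cs generalizing L M acc with
  | nil =>
    have hMlen : M = value.toList.length := by
      have h := congrArg List.length hdrop
      rw [List.length_drop] at h
      simp only [List.length_nil] at h
      omega
    subst hMlen
    simp only [idxC, List.map_nil, List.foldl_nil, splitDollar, mapHead,
      List.map_cons, List.map_nil, List.append_nil]
    by_cases hL : L = value.toList.length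
    · have hc : (L : Int) = PySem.Str.len value := by
        rw [PySem.Str.len_eq]; exact_mod_cast hL
      rw [if_pos hc, hL]
      simp only [List.drop_length, List.take_nil]
    · have hc : ¬ ((L : Int) = PySem.Str.len value) := by
        rw [PySem.Str.len_eq]
        intro h; exact hL (by exact_mod_cast h)
      rw [if_neg hc, PySem.Str.len_eq, slice_nat]
  | cons c cs ih =>
    have hMlt : M < value.toList.length := by
      by_contra h
      have : value.toList.drop M = [] := List.drop_eq_nil_of_le (by omega)
      rw [this] at hdrop; exact absurd hdrop.symm (List.cons_ne_nil c cs)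
    have hdrop' : value.toList.drop (M + 1) = cs := by
      rw [← List.drop_drop, hdrop]; rfl
    have hgetM : value.toList[M]? = some c := by
      have h0 : (value.toList.drop M)[0]? = some c := by rw [hdrop]; rfl
      simpa using h0
    by_cases hc : c = '$'
    · have hidx : idxC (c :: cs) = 0 :: (idxC cs).map (· + 1) := by simp [idxC, hc]
      rw [hidx, List.map_cons, List.foldl_cons, List.map_map]
      have hmapeq : (idxC cs).map ((fun k => ((M + k : Nat) : Int)) ∘ (· + 1))
          = (idxC cs).map (fun k => (((M + 1) + k : Nat) : Int)) :=
        List.map_congr_left (fun k _ => by simp only [Function.comp_apply]; omega)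
      have hstFst : stepA value (acc, (L : Int)) ((M + 0 : Nat) : Int)
          = (acc ++ [String.ofList ((value.toList.drop L).take (M - L))], ((M + 1 : Nat) : Int)) := by
        unfold stepA
        refine Prod.ext ?_ (by push_cast; ring)
        simp only
        rw [show ((M + 0 : Nat) : Int) = ((M : Nat) : Int) by omega, slice_nat]
      rw [hmapeq, hstFst,
        ih (L := M + 1) (M := M + 1)
          (acc := acc ++ [String.ofList ((value.toList.drop L).take (M - L))])
          hdrop' (le_refl _) (by omega)]
      cases hsd : splitDollar cs with
      | nil => exact absurd hsd (splitDollar_ne_nil cs)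
      | cons h t => simp [splitDollar, hc, hsd, mapHead]
    · have hidx : idxC (c :: cs) = (idxC cs).map (· + 1) := by simp [idxC, hc]
      rw [hidx, List.map_map]
      have hmapeq : (idxC cs).map ((fun k => ((M + k : Nat) : Int)) ∘ (· + 1))
          = (idxC cs).map (fun k => (((M + 1) + k : Nat) : Int)) :=
        List.map_congr_left (fun k _ => by simp only [Function.comp_apply]; omega)
      rw [hmapeq, ih (L := L) (M := M + 1) (acc := acc) hdrop' (by omega) (by omega)]
      have hbuf : (value.toList.drop L).take (M + 1 - L)
          = (value.toList.drop L).take (M - L) ++ [c] := by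
        have h1 : M + 1 - L = (M - L) + 1 := by omega
        have h2 : (value.toList.drop L)[M - L]? = some c := by
          rw [List.getElem?_drop]
          rw [show L + (M - L) = M by omega, hgetM]
        rw [h1, List.take_add_one, h2]; rfl
      congr 1
      cases hsd : splitDollar cs with
      | nil => exact absurd hsd (splitDollar_ne_nil cs)
      | cons h t =>
        simp only [splitDollar, hc, hsd, mapHead, hbuf]
        simp

theorem A_eq_split (value : String) :
    parseHeaderValue value = (splitDollar value.toList).map String.ofList := by
  have h := A_main value.toList value 0 0 [] (by simp) (le_refl _) (by simp)
  simp only [List.drop_zero, Nat.sub_self, List.take_zero, List.nil_append,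
    mapHead_id] at h
  unfold parseHeaderValue
  rw [getIndexesToParse_eq]
  exact h

theorem B_loop (cs : List Char) (acc : List String) (cur : List Char) :
    (cs.foldl
        (fun (st : List String × List Char) c =>
          if c = '$' then (st.1 ++ [String.ofList st.2], [])
          else (st.1, st.2 ++ [c]))
        (acc, cur)).1
      ++ [String.ofList (cs.foldl
        (fun (st : List String × List Char) c =>
          if c = '$' then (st.1 ++ [String.ofList st.2], [])
          else (st.1, st.2 ++ [c]))
        (acc, cur)).2]
    = acc ++ (mapHead (fun h => cur ++ h) (splitDollar cs)).map String.ofList := by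
  induction cs generalizing acc cur with
  | nil => simp [splitDollar, mapHead]
  | cons c cs ih =>
    by_cases hc : c = '$'
    · simp only [List.foldl_cons, if_pos hc]
      rw [ih (acc ++ [String.ofList cur]) []]
      cases hsd : splitDollar cs with
      | nil => exact absurd hsd (splitDollar_ne_nil cs)
      | cons h t => simp [splitDollar, hc, hsd, mapHead]
    · simp only [List.foldl_cons, if_neg hc]
      rw [ih acc (cur ++ [c])]
      congr 1
      cases hsd : splitDollar cs with
      | nil => exact absurd hsd (splitDollar_ne_nil cs)
      | cons h t => simp [splitDollar, hc, hsd, mapHead]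

theorem B_eq_split (value : String) :
    parseHeaderValue_alt value = (splitDollar value.toList).map String.ofList := by
  have h := B_loop value.toList [] []
  simp only [List.nil_append, mapHead_id] at h
  unfold parseHeaderValue_alt
  exact h

-- ===== VERDICT (by name: the statement is the Claim_ definition above) =====
theorem parseHeaderValue_spec : Claim_equal_parseHeaderValue := by
  intro value _
  unfold Spec_parseHeaderValue
  rw [A_eq_split, B_eq_split]
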